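-- pv_equiv track=rewrite | github.com/SnowSpider/Dashboard | WeeklyReport.py | col_to_num
-- ===== SOURCE A (Python) =====
-- def col_to_num(col_str):
--   # Convert base26 column string to number.
--   exponent = 0
--   col_num = 0
--   for char in reversed(col_str):
--     col_num += (ord(char) - ord('A') + 1) * (26 ** exponent)
--     exponent += 1
--   col_num -= 1 # to be or not to be ...
--   return col_num
-- ===== SOURCE B (Python) =====
-- def col_to_num(col_str):
--   # Tail-recursive Horner evaluation: consume the string from the front,
--   # folding each letter into a single accumulator; no exponent, no powers.
--   def go(acc, rest):
--     if not rest: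
--       return acc - 1
--     return go(acc * 26 + ord(rest[0]) - 64, rest[1:])
--   return go(0, col_str)
-- ===== Notes on version B (the rewrite author's own statement) =====
-- stated objective: alternative
-- what changed: Replaces the reversed loop that maintains an explicit exponent and recomputes 26**exponent each step by a tail-recursive forward Horner scheme carrying one accumulator and no powers.
import Mathlib
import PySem

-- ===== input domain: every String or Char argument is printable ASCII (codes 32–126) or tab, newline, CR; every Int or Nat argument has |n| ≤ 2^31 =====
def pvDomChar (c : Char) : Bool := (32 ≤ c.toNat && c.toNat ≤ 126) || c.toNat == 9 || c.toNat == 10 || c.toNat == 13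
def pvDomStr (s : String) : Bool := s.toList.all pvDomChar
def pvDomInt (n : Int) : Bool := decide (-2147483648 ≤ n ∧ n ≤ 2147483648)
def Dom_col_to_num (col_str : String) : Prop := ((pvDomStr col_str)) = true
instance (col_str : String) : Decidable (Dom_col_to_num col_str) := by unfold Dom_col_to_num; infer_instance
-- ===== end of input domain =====

-- B replaces A's reversed loop (explicit exponent, recomputed 26**exponent powers)
-- by a tail-recursive forward Horner scheme with one accumulator (objective: alternative).


-- ===== PORT A =====
-- A: loop over reversed(col_str), state = (exponent, col_num), power 26 ** exponent
def colStepA (p : Nat × Int) (c : Char) : Nat × Int :=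
  (p.1 + 1, p.2 + ((c.toNat : Int) - 65 + 1) * 26 ^ p.1)

def col_to_num (col_str : String) : Int :=
  (col_str.toList.reverse.foldl colStepA (0, 0)).2 - 1

-- ===== PORT B =====
-- B: tail recursion from the front, single accumulator, '-1' applied at the base case
def colGoB (acc : Int) : List Char → Int
  | [] => acc - 1
  | c :: rest => colGoB (acc * 26 + ((c.toNat : Int) - 64)) rest

def col_to_num_alt (col_str : String) : Int :=
  colGoB 0 col_str.toList

-- ===== PRECONDITION & SPEC =====
def Spec_col_to_num (col_str : String) (out : Int) : Prop := out = col_to_num_alt col_str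
instance (col_str : String) (out : Int) : Decidable (Spec_col_to_num col_str out) := by unfold Spec_col_to_num; infer_instance

-- ===== CLAIM (what is proved, stated in full; the proofs are below) =====
def Claim_equal_col_to_num : Prop := ∀ (col_str : String), Dom_col_to_num col_str → Spec_col_to_num col_str (col_to_num col_str)

-- ===== LEMMAS AND PROOFS =====

theorem colA_fst (l : List Char) (e : Nat) (n : Int) :
    (l.foldl colStepA (e, n)).1 = e + l.length := by
  induction l generalizing e n with
  | nil => simp
  | cons c t ih => simp [List.foldl, colStepA, ih]; omega

theorem colA_snd (l : List Char) (e : Nat) (n : Int) :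
    (l.foldl colStepA (e, n)).2 = n + 26 ^ e * (l.foldl colStepA (0, 0)).2 := by
  induction l generalizing e n with
  | nil => simp
  | cons c t ih =>
    simp only [List.foldl, colStepA]
    rw [ih, ih ((0:Nat)+1)]
    ring

theorem colGoB_shift (l : List Char) (a : Int) :
    colGoB a l = a * 26 ^ l.length + colGoB 0 l := by
  induction l generalizing a with
  | nil => simp [colGoB]; ring
  | cons c t ih =>
    simp only [colGoB]
    rw [ih, ih ((0:Int) * 26 + _)]
    simp only [List.length_cons, pow_succ]
    ring

theorem col_main (l : List Char) :
    (l.reverse.foldl colStepA (0, 0)).2 - 1 = colGoB 0 l := by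
  induction l with
  | nil => simp [colGoB]
  | cons c t ih =>
    have h1 : (c :: t).reverse = t.reverse ++ [c] := by simp
    rw [h1, List.foldl_append]
    simp only [List.foldl, colStepA]
    rw [colA_snd, colA_fst]
    simp only [colGoB]
    rw [colGoB_shift]
    simp only [List.length_reverse]
    rw [← ih]; ring

-- ===== VERDICT (by name: the statement is the Claim_ definition above) =====
theorem col_to_num_spec : Claim_equal_col_to_num := by
  intro s _
  unfold Spec_col_to_num col_to_num col_to_num_alt
  rw [← col_main]
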